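-- pv_equiv track=rewrite | github.com/Eren-Nevin/MobileAgents | backend/app/services/control_mode/escaping.py | escape_input
-- ===== SOURCE A (Python) =====
-- def escape_input(data: str) -> str:
--     """
--     Escape data for sending to tmux control mode.
--
--     Escapes control characters and backslashes to octal format.
--
--     Args:
--         data: String to escape
--
--     Returns:
--         Escaped string safe for tmux control mode
--     """
--     result = []
--     for char in data:
--         code = ord(char)
--         # Escape control chars (except newline which tmux handles) and backslash
--         if code < 32 or char == '\\':
--             result.append(f'\\{code:03o}')
--         else:
--             result.append(char)
--     return ''.join(result)
-- ===== SOURCE B (Python) =====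
-- def escape_input(data: str) -> str:
--     """Escape control chars and backslash to octal, copying maximal safe runs whole.
--
--     Two-pointer scan: find each maximal run of characters that need no escaping,
--     append it as one slice, then append the octal escape for the special character
--     that ended the run.
--     """
--     out = []
--     i = 0
--     n = len(data)
--     while i < n:
--         j = i
--         while j < n and data[j] >= ' ' and data[j] != '\\':
--             j += 1
--         out.append(data[i:j])
--         if j < n:
--             out.append('\\%03o' % ord(data[j]))
--             j += 1
--         i = j
--     return ''.join(out)
-- ===== Notes on version B (the rewrite author's own statement) =====
-- stated objective: alternative
-- what changed: B replaces A's per-character loop-and-branch with a two-pointer scan that copies each maximal run of non-special characters as one slice and emits an octal escape only at run boundaries; it trades per-char appends for slice copies and is not measurably faster on the generated inputs.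
import Mathlib
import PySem

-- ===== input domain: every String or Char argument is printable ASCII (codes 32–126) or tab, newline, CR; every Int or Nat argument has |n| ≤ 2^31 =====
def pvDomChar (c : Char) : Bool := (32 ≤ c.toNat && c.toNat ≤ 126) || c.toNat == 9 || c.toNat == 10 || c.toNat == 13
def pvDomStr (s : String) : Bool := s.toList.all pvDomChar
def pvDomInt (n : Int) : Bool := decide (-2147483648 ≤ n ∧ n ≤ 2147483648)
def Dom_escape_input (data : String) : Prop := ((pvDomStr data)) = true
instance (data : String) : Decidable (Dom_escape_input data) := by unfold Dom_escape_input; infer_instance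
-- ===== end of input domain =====

-- B replaces A's per-character loop-and-branch with a two-pointer scan that copies each
-- maximal run of non-special characters as one slice (alternative decomposition, same cost).

-- ===== PORT A =====
-- f'\{code:03o}' / '\%03o' % code: backslash followed by three octal digits (codes here < 512)
def pvOct3 (code : Nat) : String :=
  String.ofList ['\\', Char.ofNat (48 + code / 64 % 8), Char.ofNat (48 + code / 8 % 8),
             Char.ofNat (48 + code % 8)]

def escape_input (data : String) : String :=
  let result := data.toList.foldl (fun result char =>
    let code := char.toNat
    if code < 32 || char == '\\' then result ++ [pvOct3 code]
    else result ++ [String.ofList [char]]) []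
  String.join result

-- ===== PORT B =====
-- inner while condition: data[j] >= ' ' and data[j] != '\\'
def pvSafe (c : Char) : Bool := ' ' ≤ c && c != '\\'

-- inner while loop: advance j while in range and safe
def pvFindRun (data : List Char) (j : Nat) : Nat :=
  if h : j < data.length then
    if pvSafe (data[j]'h) then pvFindRun data (j + 1) else j
  else j
termination_by data.length - j

-- termination fact the outer loop's recursion needs
lemma pvFindRun_ge (data : List Char) (j : Nat) : j ≤ pvFindRun data j := by
  fun_induction pvFindRun data j with
  | case1 j h hs ih => omega
  | case2 j h hs => omega
  | case3 j h => omega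

-- outer while loop over i; data[i:j] ported as (drop i).take (j-i), exact for 0 ≤ i ≤ j ≤ n
def pvRuns (data : List Char) (i : Nat) : List String :=
  if h : i < data.length then
    let j := pvFindRun data i
    let seg := String.ofList ((data.drop i).take (j - i))
    if hj : j < data.length then
      seg :: pvOct3 ((data[j]'hj).toNat) :: pvRuns data (j + 1)
    else [seg]
  else []
termination_by data.length - i
decreasing_by
  have := pvFindRun_ge data i
  omega

def escape_input_alt (data : String) : String :=
  String.join (pvRuns data.toList 0)

-- ===== PRECONDITION & SPEC =====
def Spec_escape_input (data : String) (out : String) : Prop := out = escape_input_alt data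
instance (data : String) (out : String) : Decidable (Spec_escape_input data out) := by unfold Spec_escape_input; infer_instance

-- ===== CLAIM =====
def Claim_equal_escape_input : Prop := ∀ (data : String), Dom_escape_input data → Spec_escape_input data (escape_input data)

-- ===== LEMMAS AND PROOFS =====

-- per-character output of A, as a list of chars
def pvFA (c : Char) : List Char :=
  if c.toNat < 32 || c == '\\' then (pvOct3 c.toNat).toList else [c]

lemma pv_safe_fa (c : Char) (h : pvSafe c = true) : pvFA c = [c] := by
  unfold pvSafe at h
  unfold pvFA
  simp only [Bool.and_eq_true, bne_iff_ne, decide_eq_true_eq] at h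
  obtain ⟨h1, h2⟩ := h
  have h32 : ¬ c.toNat < 32 := by
    have : (' ' : Char).toNat ≤ c.toNat := by
      exact h1
    simpa using Nat.not_lt.mpr this
  simp [h32, h2]

lemma pv_unsafe_fa (c : Char) (h : pvSafe c = false) : pvFA c = (pvOct3 c.toNat).toList := by
  unfold pvSafe at h
  unfold pvFA
  simp only [Bool.and_eq_false_iff, bne_eq_false_iff_eq, decide_eq_false_iff_not] at h
  rcases h with h | h
  · have : c.toNat < 32 := by
      have := Nat.lt_of_not_le (fun hle => h (by exact hle))
      simpa using this
    simp [this]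
  · simp [h]

lemma pv_foldl_append_toList (l : List String) (s : String) :
    (l.foldl (· ++ ·) s).toList = s.toList ++ l.flatMap String.toList := by
  induction l generalizing s with
  | nil => simp
  | cons a t ih => simp [ih (s ++ a)]

lemma pv_join_toList (l : List String) :
    (String.join l).toList = l.flatMap String.toList := by
  unfold String.join
  rw [pv_foldl_append_toList]
  rfl

theorem pv_A_eq (data : String) :
    escape_input data = String.ofList (data.toList.flatMap pvFA) := by
  unfold escape_input
  apply String.toList_inj.mp
  rw [show (fun (result : List String) (char : Char) =>
        if char.toNat < 32 || char == '\\' then result ++ [pvOct3 char.toNat]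
        else result ++ [String.ofList [char]])
      = (fun result char => result ++
          (if char.toNat < 32 || char == '\\' then [pvOct3 char.toNat]
           else [String.ofList [char]])) from by
      funext r c; split <;> simp]
  rw [PySem.List.foldl_append_eq_flatMap]
  rw [pv_join_toList]
  simp only [List.nil_append, String.toList_ofList]
  rw [List.flatMap_assoc]
  apply List.flatMap_congr
  intro c _
  unfold pvFA
  split <;> simp

-- run characterisation: chars in [i, pvFindRun i) are safe
lemma pvFindRun_safe (data : List Char) (i : Nat) :
    ∀ k (hk : k < data.length), i ≤ k → k < pvFindRun data i → pvSafe (data[k]'hk) = true := by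
  fun_induction pvFindRun data i with
  | case1 j h hs ih =>
    intro k hk hle hlt
    rcases Nat.eq_or_lt_of_le hle with rfl | hlt'
    · exact hs
    · exact ih k hk hlt' hlt
  | case2 j h hs => intro k hk hle hlt; omega
  | case3 j h => intro k hk hle hlt; omega

lemma pvFindRun_stop (data : List Char) (i : Nat) (hj : pvFindRun data i < data.length) :
    pvSafe (data[pvFindRun data i]'hj) = false := by
  fun_induction pvFindRun data i with
  | case1 j h hs ih => exact ih hj
  | case2 j h hs => simpa using hs
  | case3 j h => exact absurd hj h

-- every char of the copied run is safe
lemma pv_run_members (data : List Char) (i : Nat) (c : Char)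
    (hc : c ∈ (data.drop i).take (pvFindRun data i - i)) : pvSafe c = true := by
  rw [List.mem_iff_getElem] at hc
  obtain ⟨m, hm, hceq⟩ := hc
  have hml : i + m < data.length := by
    simp [List.length_take, List.length_drop] at hm; omega
  have hmj : i + m < pvFindRun data i := by
    simp [List.length_take, List.length_drop] at hm; omega
  have : ((data.drop i).take (pvFindRun data i - i))[m]'hm = data[i + m]'hml := by
    simp [List.getElem_take, List.getElem_drop]
  rw [← hceq, this]
  exact pvFindRun_safe data i (i + m) hml (Nat.le_add_right i m) hmj

-- the copied run maps to itself under A's per-char function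
lemma pv_run_flat (data : List Char) (i : Nat) :
    ((data.drop i).take (pvFindRun data i - i)).flatMap pvFA
      = (data.drop i).take (pvFindRun data i - i) := by
  have h := List.flatMap_congr (l := (data.drop i).take (pvFindRun data i - i))
    (f := pvFA) (g := fun c => [c])
    (fun c hc => pv_safe_fa c (pv_run_members data i c hc))
  simpa using h

-- B's output, char-flattened, equals A's flatMap over the tail from i
lemma pv_runs_eq (data : List Char) (i : Nat) :
    (pvRuns data i).flatMap String.toList = (data.drop i).flatMap pvFA := by
  fun_induction pvRuns data i with
  | case1 i h j seg hj ih =>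
    have hij : i ≤ j := pvFindRun_ge data i
    have hsplit : data.drop i = (data.drop i).take (j - i) ++ data.drop j := by
      have h1 : (data.drop i).drop (j - i) = data.drop j := by
        rw [List.drop_drop]
        congr 1
        omega
      rw [← h1, List.take_append_drop]
    have hdropj : data.drop j = data[j] :: data.drop (j + 1) :=
      List.drop_eq_getElem_cons hj
    have hfa : pvFA (data[j]'hj) = (pvOct3 ((data[j]'hj).toNat)).toList :=
      pv_unsafe_fa _ (pvFindRun_stop data i hj)
    conv_rhs => rw [hsplit, List.flatMap_append, hdropj]
    simp only [List.flatMap_cons, hfa, ih, seg]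
    rw [pv_run_flat data i]
    simp only [String.toList_ofList]
    rfl
  | case2 i h j seg hj =>
    have hij : i ≤ j := pvFindRun_ge data i
    have hjlen : data.length ≤ j := Nat.le_of_not_lt hj
    have hall : data.drop i = (data.drop i).take (j - i) := by
      rw [List.take_of_length_le]
      simp [List.length_drop]; omega
    rw [hall]
    simp only [List.flatMap_cons, List.flatMap_nil, List.append_nil, seg, String.toList_ofList]
    exact (pv_run_flat data i).symm
  | case3 i h =>
    simp [List.drop_eq_nil_of_le (Nat.le_of_not_lt h)]

-- ===== VERDICT =====
theorem escape_input_spec : Claim_equal_escape_input := by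
  intro data _
  unfold Spec_escape_input escape_input_alt
  rw [pv_A_eq]
  apply String.toList_inj.mp
  rw [pv_join_toList, pv_runs_eq]
  simp
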